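-- pv_equiv track=rewrite | github.com/YanShuoPan/Qtrading | modules/hot_stocks_generator.py | _count_anue_stock_mentions
-- ===== SOURCE A (Python) =====
-- from collections import defaultdict
--
-- def _count_anue_stock_mentions(
--     stock_sets: list[set[str]],
--     stock_tag_map: dict[str, set[str]],
-- ) -> dict[str, int]:
--     """
--     利用 Anue 直接標記的股票代碼，反查 tag_id 計數。
--     每篇文章若含有屬於某主題的股票，該主題 +1（每篇最多 +1）。
--     """
--     # 建立反查表: stock_id → [tag_ids]
--     stock_to_tags: dict[str, list[str]] = defaultdict(list)
--     for tag_id, stocks in stock_tag_map.items():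
--         for sid in stocks:
--             stock_to_tags[sid].append(tag_id)
--
--     counts: dict[str, int] = defaultdict(int)
--     for stocks in stock_sets:
--         hit_tags: set[str] = set()
--         for sid in stocks:
--             for tag_id in stock_to_tags.get(sid, []):
--                 hit_tags.add(tag_id)
--         for tag_id in hit_tags:
--             counts[tag_id] += 1
--
--     return dict(counts)
-- ===== SOURCE B (Python) =====
-- def _count_anue_stock_mentions(
--     stock_sets: list[set[str]],
--     stock_tag_map: dict[str, set[str]],
-- ) -> dict[str, int]:
--     # Direct nested scan: no reverse index, no defaultdicts, no per-article tag set.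
--     counts: dict[str, int] = {}
--     for stocks in stock_sets:
--         for tag_id, tag_stocks in stock_tag_map.items():
--             if tag_stocks & stocks:
--                 counts[tag_id] = counts.get(tag_id, 0) + 1
--     return counts
-- ===== Notes on version B (the rewrite author's own statement) =====
-- stated objective: simpler
-- what changed: Drops the reverse stock-to-tags index and the per-article hit-tag set: B directly scans each (tag, stocks) pair per article and increments the tag's count when the set intersection with the article is non-empty.
import Mathlib
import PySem

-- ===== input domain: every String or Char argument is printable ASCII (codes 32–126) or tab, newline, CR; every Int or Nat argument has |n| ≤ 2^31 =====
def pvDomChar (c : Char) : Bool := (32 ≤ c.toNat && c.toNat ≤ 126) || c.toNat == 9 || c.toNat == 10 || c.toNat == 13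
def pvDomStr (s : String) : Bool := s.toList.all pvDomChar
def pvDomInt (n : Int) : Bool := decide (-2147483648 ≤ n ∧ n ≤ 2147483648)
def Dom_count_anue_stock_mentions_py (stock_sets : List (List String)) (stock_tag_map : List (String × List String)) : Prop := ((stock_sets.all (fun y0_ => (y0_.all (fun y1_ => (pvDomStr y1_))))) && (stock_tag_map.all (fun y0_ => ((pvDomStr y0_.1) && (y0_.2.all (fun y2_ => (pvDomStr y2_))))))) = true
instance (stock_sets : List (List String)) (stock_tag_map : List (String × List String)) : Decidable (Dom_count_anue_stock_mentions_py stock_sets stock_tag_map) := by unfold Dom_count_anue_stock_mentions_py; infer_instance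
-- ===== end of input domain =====

-- B drops A's reverse stock→tags index and per-article hit-tag set in favour of a direct
-- per-article scan of the tag map with a set-intersection test (objective: simpler).

-- ===== PORT A =====
def count_anue_stock_mentions_py (stock_sets : List (List String)) (stock_tag_map : List (String × List String)) : List (String × Int) :=
  -- stock_to_tags (dict stock_id → [tag_ids], the defaultdict(list) append loop) and the
  -- per-article set hit_tags are single-use and written inline below.
  (stock_sets.foldl (fun c stocks =>
      -- Python iterates the set hit_tags in unspecified (hash-randomised) order; this port
      -- enumerates the same set in stock_tag_map key order, one faithful order choice
      -- (the resulting dict output is compared ignoring order).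
      ((PySem.Set.ofList (stock_tag_map.map Prod.fst)).filter
          (fun t => PySem.Set.contains
            (stocks.foldl (fun h sid =>
                (((stock_tag_map.foldl (fun d p => p.2.foldl (fun d s => d.modify s [] (fun l => l ++ [p.1])) d)
                    PySem.Dict.empty)).getD sid []).foldl (fun h t => PySem.Set.add h t) h)
              PySem.Set.empty) t)).foldl
        (fun c t => c.modify t 0 (fun n => n + 1)) c)
    (PySem.Dict.empty : PySem.Dict String Int)).items

-- ===== PORT B =====
def count_anue_stock_mentions_py_alt (stock_sets : List (List String)) (stock_tag_map : List (String × List String)) : List (String × Int) :=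
  (stock_sets.foldl (fun c stocks =>
      stock_tag_map.foldl (fun c p =>
        if !(PySem.Set.inter (PySem.Set.ofList p.2) stocks).isEmpty then
          c.insert p.1 (c.getD p.1 0 + 1)
        else c) c) (PySem.Dict.empty : PySem.Dict String Int)).items

-- ===== PRECONDITION & SPEC =====
-- Pre_ excludes association lists with a repeated tag key: those do not represent any
-- Python dict argument (dict keys are unique), so A's behaviour on them is not defined.
def Pre_count_anue_stock_mentions_py (stock_sets : List (List String)) (stock_tag_map : List (String × List String)) : Prop :=
  (stock_tag_map.map Prod.fst).Nodup
instance (stock_sets : List (List String)) (stock_tag_map : List (String × List String)) : Decidable (Pre_count_anue_stock_mentions_py stock_sets stock_tag_map) := by unfold Pre_count_anue_stock_mentions_py; infer_instance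

def pvWitness_count_anue_stock_mentions_py : List (List String) × (List (String × List String)) :=
  ([["2330"], ["1101", "2330"]], [("tech", ["2330"]), ("cement", ["1101"])])

def Spec_count_anue_stock_mentions_py (stock_sets : List (List String)) (stock_tag_map : List (String × List String)) (out : List (String × Int)) : Prop := out = count_anue_stock_mentions_py_alt stock_sets stock_tag_map
instance (stock_sets : List (List String)) (stock_tag_map : List (String × List String)) (out : List (String × Int)) : Decidable (Spec_count_anue_stock_mentions_py stock_sets stock_tag_map out) := by unfold Spec_count_anue_stock_mentions_py; infer_instance

-- ===== CLAIM (what is proved, stated in full; the proofs are below) =====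
def Claim_equal_count_anue_stock_mentions_py : Prop := ∀ (stock_sets : List (List String)) (stock_tag_map : List (String × List String)), Dom_count_anue_stock_mentions_py stock_sets stock_tag_map → Pre_count_anue_stock_mentions_py stock_sets stock_tag_map → Spec_count_anue_stock_mentions_py stock_sets stock_tag_map (count_anue_stock_mentions_py stock_sets stock_tag_map)

-- ===== LEMMAS AND PROOFS =====

-- membership in the reverse index after the inner append loop over one tag's stock list
theorem idx_inner_mem (sids : List String) (tag : String)
    (d : PySem.Dict String (List String)) (sid t : String) :
    t ∈ (sids.foldl (fun d s => d.modify s [] (fun l => l ++ [tag])) d).getD sid []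
      ↔ t ∈ d.getD sid [] ∨ (t = tag ∧ sid ∈ sids) := by
  induction sids generalizing d with
  | nil => simp
  | cons s ss ih =>
    simp only [List.foldl_cons, ih, PySem.Dict.getD_modify, List.mem_cons]
    split_ifs with h
    · subst h; simp; tauto
    · constructor
      · rintro (h1 | ⟨h1, h2⟩)
        · exact Or.inl h1
        · exact Or.inr ⟨h1, Or.inr h2⟩
      · rintro (h1 | ⟨h1, h2 | h2⟩)
        · exact Or.inl h1
        · exact absurd h2 h
        · exact Or.inr ⟨h1, h2⟩

-- membership in the full reverse index
theorem idx_mem (m : List (String × List String))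
    (d : PySem.Dict String (List String)) (sid t : String) :
    t ∈ (m.foldl (fun d p => p.2.foldl (fun d s => d.modify s [] (fun l => l ++ [p.1])) d) d).getD sid []
      ↔ t ∈ d.getD sid [] ∨ ∃ p ∈ m, p.1 = t ∧ sid ∈ p.2 := by
  induction m generalizing d with
  | nil => simp
  | cons p ps ih =>
    simp only [List.foldl_cons, ih, idx_inner_mem, List.mem_cons]
    constructor
    · rintro ((h1 | ⟨h1, h2⟩) | ⟨q, hq, h1, h2⟩)
      · exact Or.inl h1
      · exact Or.inr ⟨p, Or.inl rfl, h1.symm, h2⟩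
      · exact Or.inr ⟨q, Or.inr hq, h1, h2⟩
    · rintro (h1 | ⟨q, hq | hq, h1, h2⟩)
      · exact Or.inl (Or.inl h1)
      · subst hq; exact Or.inl (Or.inr ⟨h1.symm, h2⟩)
      · exact Or.inr ⟨q, hq, h1, h2⟩

-- membership in the per-article hit_tags set
theorem hit_mem (idx : PySem.Dict String (List String)) (stocks : List String)
    (h : PySem.Set String) (t : String) :
    t ∈ stocks.foldl (fun h sid => (idx.getD sid []).foldl (fun h t => PySem.Set.add h t) h) h
      ↔ t ∈ h ∨ ∃ sid ∈ stocks, t ∈ idx.getD sid [] := by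
  induction stocks generalizing h with
  | nil => simp
  | cons s ss ih =>
    have base : t ∈ (idx.getD s []).foldl (fun h t => PySem.Set.add h t) h
        ↔ t ∈ h ∨ t ∈ idx.getD s [] := by
      have := PySem.Set.mem_foldl_add (l := idx.getD s []) (f := fun x => x) (s := h) (y := t)
      simpa using this
    simp only [List.foldl_cons, ih, base, List.mem_cons]
    constructor
    · rintro ((h1 | h1) | ⟨sid, h1, h2⟩)
      · exact Or.inl h1
      · exact Or.inr ⟨s, Or.inl rfl, h1⟩
      · exact Or.inr ⟨sid, Or.inr h1, h2⟩
    · rintro (h1 | ⟨sid, h1 | h1, h2⟩)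
      · exact Or.inl (Or.inl h1)
      · subst h1; exact Or.inl (Or.inr h2)
      · exact Or.inr ⟨sid, h1, h2⟩

-- the set-intersection truthiness test of B
theorem inter_nonempty (xs ys : List String) :
    ((!(PySem.Set.inter (PySem.Set.ofList xs) ys).isEmpty) = true) ↔ ∃ s ∈ xs, s ∈ ys := by
  rw [Bool.not_eq_eq_eq_not, Bool.not_true, List.isEmpty_eq_false_iff_exists_mem]
  constructor
  · rintro ⟨x, hx⟩
    have := (PySem.Set.mem_inter (PySem.Set.ofList xs) ys x).1 hx
    exact ⟨x, (PySem.Set.mem_ofList xs x).1 this.1, this.2⟩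
  · rintro ⟨x, hx, hy⟩
    exact ⟨x, (PySem.Set.mem_inter _ _ _).2 ⟨(PySem.Set.mem_ofList _ _).2 hx, hy⟩⟩

-- with unique tag keys, one article's counting step of A equals B's direct scan
theorem step_eq (m : List (String × List String)) (hnd : (m.map Prod.fst).Nodup)
    (stocks : List String) (c : PySem.Dict String Int) :
    ((PySem.Set.ofList (m.map Prod.fst)).filter (fun t => PySem.Set.contains
        (stocks.foldl (fun h sid =>
          (((m.foldl (fun d p => p.2.foldl (fun d s => d.modify s [] (fun l => l ++ [p.1])) d)
              PySem.Dict.empty)).getD sid []).foldl (fun h t => PySem.Set.add h t) h)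
          PySem.Set.empty) t)).foldl
       (fun c t => c.modify t 0 (fun n => n + 1)) c
    = m.foldl (fun c p =>
        if !(PySem.Set.inter (PySem.Set.ofList p.2) stocks).isEmpty then
          c.insert p.1 (c.getD p.1 0 + 1)
        else c) c := by
  have hofl : PySem.Set.ofList (m.map Prod.fst) = m.map Prod.fst := by
    rw [← PySem.Set.update_nil_left,
      PySem.Set.update_eq_append_of_disjoint [] (m.map Prod.fst) hnd (by intro x hx; exact List.not_mem_nil)]
    simp
  rw [hofl, ← PySem.List.foldl_if_eq_foldl_filter, List.foldl_map]
  apply PySem.List.foldl_congr_mem'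
  intro p hp c'
  have hcond : PySem.Set.contains
      (stocks.foldl (fun h sid =>
          (((m.foldl (fun d p => p.2.foldl (fun d s => d.modify s [] (fun l => l ++ [p.1])) d)
              PySem.Dict.empty)).getD sid []).foldl (fun h t => PySem.Set.add h t) h)
        PySem.Set.empty) p.1
      = !(PySem.Set.inter (PySem.Set.ofList p.2) stocks).isEmpty := by
    rw [Bool.eq_iff_iff, PySem.Set.contains_iff, hit_mem, inter_nonempty]
    constructor
    · rintro (h1 | ⟨sid, hsid, hmem⟩)
      · simp [PySem.Set.empty] at h1
      · rw [idx_mem] at hmem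
        rcases hmem with h1 | ⟨q, hq, hq1, hq2⟩
        · simp [PySem.Dict.getD_empty] at h1
        · have : q = p := List.inj_on_of_nodup_map hnd hq hp (by rw [hq1])
          subst this
          exact ⟨sid, hq2, hsid⟩
    · rintro ⟨s, hs1, hs2⟩
      refine Or.inr ⟨s, hs2, ?_⟩
      rw [idx_mem]
      exact Or.inr ⟨p, hp, rfl, hs1⟩
  rw [hcond]
  split_ifs with h
  · rfl
  · rfl

-- ===== VERDICT (by name: the statement is the Claim_ definition above) =====
theorem count_anue_stock_mentions_py_spec : Claim_equal_count_anue_stock_mentions_py := by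
  intro ss m _ hpre
  unfold Spec_count_anue_stock_mentions_py count_anue_stock_mentions_py count_anue_stock_mentions_py_alt
  congr 1
  apply PySem.List.foldl_congr_mem
  intro c stocks _
  exact step_eq m hpre stocks c
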